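-- pv_equiv track=rewrite | github.com/equinor/ert | ert/ensemble_evaluator/activerange.py | rangestring_to_mask
-- ===== SOURCE A (Python) =====
-- from typing import Collection, List, Optional, Tuple, Union
--
-- def rangestring_to_mask(rangestring: str, length: int) -> List[bool]:
--     """Convert a string specifying ranges of elements, and the number of elements,
--     into a list of booleans. The ranges are end-inclusive."""
--     mask = [False] * length
--     if rangestring == "":
--         # An empty string means all realizations deactivated. Note that an
--         # ActiveRange-typed instance being None means the opposite
--         return mask
--     for _range in rangestring.split(","):
--         if "-" in _range:
--             if len(_range.strip().split("-")) != 2: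
--                 raise ValueError(f"Wrong range syntax {_range}")
--             start, end = map(int, _range.strip().split("-"))
--             if end < start:
--                 raise ValueError(f"Range {start}-{end} has invalid direction")
--             if end + 1 > length:
--                 raise ValueError(
--                     f"Range endpoint {end} is beyond the mask length {length} "
--                 )
--             mask[start : end + 1] = [True] * (end + 1 - start)
--         elif _range:
--             if int(_range) + 1 > length:
--                 raise ValueError(
--                     f"Realization index {_range} is beyond the mask length {length} "
--                 )
--             mask[int(_range)] = True
--     return mask
-- ===== SOURCE B (Python) =====
-- def rangestring_to_mask(rangestring, length):
--     """Convert a range string into an end-inclusive boolean mask.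
--
--     Two staged passes: first parse every comma segment uniformly (via one
--     strip().split("-")) into a list of (start, end) interval pairs, a single
--     index i becoming the degenerate interval (i, i); then build the mask in one
--     final pass by interval containment. No mask mutation, no early return for
--     the empty string (it simply contributes no interval)."""
--     intervals = []
--     for _range in rangestring.split(","):
--         parts = _range.strip().split("-")
--         if len(parts) == 2:
--             start, end = int(parts[0]), int(parts[1])
--             if end < start:
--                 raise ValueError(f"Range {start}-{end} has invalid direction")
--             if end + 1 > length:
--                 raise ValueError(
--                     f"Range endpoint {end} is beyond the mask length {length} "
--                 )
--             intervals.append((start, end))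
--         elif _range:
--             idx = int(_range)
--             if idx + 1 > length:
--                 raise ValueError(
--                     f"Realization index {_range} is beyond the mask length {length} "
--                 )
--             intervals.append((idx, idx))
--     return [any(start <= i <= end for start, end in intervals) for i in range(length)]
-- ===== Notes on version B (the rewrite author's own statement) =====
-- stated objective: alternative
-- what changed: B parses every comma segment uniformly with one strip().split('-') into a list of (start,end) interval pairs (a single index becoming a degenerate interval) and then builds the mask in a separate pass by interval containment, instead of A's branch on '-' membership with in-place slice/index assignment into a preallocated mask and an early return for the empty string.
import Mathlib
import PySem

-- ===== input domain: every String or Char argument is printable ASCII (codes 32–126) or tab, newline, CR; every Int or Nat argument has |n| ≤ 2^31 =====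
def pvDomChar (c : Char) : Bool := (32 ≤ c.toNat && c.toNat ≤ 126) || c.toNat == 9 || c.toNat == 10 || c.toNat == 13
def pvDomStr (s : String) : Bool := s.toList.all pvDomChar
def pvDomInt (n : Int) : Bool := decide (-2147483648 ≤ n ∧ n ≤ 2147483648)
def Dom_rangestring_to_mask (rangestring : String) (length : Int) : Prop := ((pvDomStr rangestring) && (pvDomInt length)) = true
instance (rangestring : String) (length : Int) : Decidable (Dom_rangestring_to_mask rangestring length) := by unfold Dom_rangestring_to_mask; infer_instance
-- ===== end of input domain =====

-- B replaces A's branch-on-'-' with in-place slice/index mask mutation by a uniform parse of each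
-- segment into (start,end) interval pairs followed by a separate interval-containment pass
-- (objective: alternative decomposition; no speed claim).

-- ===== PORT A =====
-- One comma-segment of A's loop body; `none` is exactly where the Python raises ValueError.
-- The slice assignment mask[start:end+1] = [True]*(end+1-start) is ported as take/replicate/drop,
-- exact here because the passed checks give 0 ≤ start ≤ end < length (start parses from a
-- '-'-free substring, hence is nonnegative), so the slice lies inside the list.
def rtmStepA (length : Int) (mask : List Bool) (r : List Char) : Option (List Bool) :=
  if PySem.Chars.isIn ['-'] r then
    match PySem.Chars.splitOn (PySem.Chars.strip r) ['-'] with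
    | [a, b] =>
      match PySem.Int.ofChars? a, PySem.Int.ofChars? b with
      | some s, some e =>
        if e < s then none
        else if e + 1 > length then none
        else some (mask.take s.toNat ++ List.replicate (e + 1 - s).toNat true ++ mask.drop (e + 1).toNat)
      | _, _ => none
    | _ => none
  else if r ≠ [] then
    match PySem.Int.ofChars? r with
    | some i => if i + 1 > length then none else some (mask.set i.toNat true)
    | none => none
  else some mask

def rangestring_to_mask (rangestring : String) (length : Int) : List Bool :=
  let mask := List.replicate length.toNat false
  if rangestring = "" then mask
  else
    match (PySem.Chars.splitOn rangestring.toList [',']).foldl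
        (fun st r => st.bind (fun m => rtmStepA length m r)) (some mask) with
    | some m => m
    | none => []   -- the Python raises here; this value is never claimed (outside Pre_)

-- ===== PORT B =====
-- Source B's loop body: parts = _range.strip().split("-"); len(parts)==2 → a dashed range,
-- otherwise a nonempty segment is a single index int(_range) (int() raising is `none`),
-- an empty segment contributes nothing. `some none` = skip, `some (some (s,e))` = append.
def rtmParseB (length : Int) (r : List Char) : Option (Option (Int × Int)) :=
  match PySem.Chars.splitOn (PySem.Chars.strip r) ['-'] with
  | [a, b] =>
    match PySem.Int.ofChars? a, PySem.Int.ofChars? b with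
    | some s, some e =>
      if e < s then none
      else if e + 1 > length then none
      else some (some (s, e))
    | _, _ => none
  | _ =>
    if r ≠ [] then
      match PySem.Int.ofChars? r with
      | some i => if i + 1 > length then none else some (some (i, i))
      | none => none
    else some none

def rangestring_to_mask_alt (rangestring : String) (length : Int) : List Bool :=
  match (PySem.Chars.splitOn rangestring.toList [',']).foldl
      (fun st r => st.bind (fun ivs =>
        (rtmParseB length r).map (fun o => match o with | none => ivs | some p => ivs ++ [p])))
      (some ([] : List (Int × Int))) with
  | some ivs =>
      (PySem.List.pyRange 0 length).map (fun i => ivs.any (fun p => decide (p.1 ≤ i) && decide (i ≤ p.2)))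
  | none => []   -- Source B raises here; this value is never claimed (outside Pre_)

-- ===== PRECONDITION & SPEC =====
-- A raises ValueError on any malformed or out-of-range comma-segment; Pre_ admits exactly the
-- inputs where every segment is empty, a valid in-range index, or a valid in-range
-- nondecreasing dashed range — i.e. exactly the inputs on which the Python A returns normally.
def pvSegOK (length : Int) (r : List Char) : Bool :=
  if PySem.Chars.isIn ['-'] r then
    match PySem.Chars.splitOn (PySem.Chars.strip r) ['-'] with
    | [a, b] =>
      match PySem.Int.ofChars? a, PySem.Int.ofChars? b with
      | some s, some e => decide (0 ≤ s ∧ s ≤ e ∧ e + 1 ≤ length)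
      | _, _ => false
    | _ => false
  else if r = [] then true
  else
    match PySem.Int.ofChars? r with
    | some i => decide (0 ≤ i ∧ i + 1 ≤ length)
    | _ => false

def Pre_rangestring_to_mask (rangestring : String) (length : Int) : Prop :=
  rangestring = "" ∨ (PySem.Chars.splitOn rangestring.toList [',']).all (pvSegOK length) = true

instance (rangestring : String) (length : Int) : Decidable (Pre_rangestring_to_mask rangestring length) := by
  unfold Pre_rangestring_to_mask; infer_instance

def pvWitness_rangestring_to_mask : String × Int := ("0-2,4", 5)

def Spec_rangestring_to_mask (rangestring : String) (length : Int) (out : List Bool) : Prop := out = rangestring_to_mask_alt rangestring length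
instance (rangestring : String) (length : Int) (out : List Bool) : Decidable (Spec_rangestring_to_mask rangestring length out) := by unfold Spec_rangestring_to_mask; infer_instance

-- ===== CLAIM (what is proved, stated in full; the proofs are below) =====
def Claim_equal_rangestring_to_mask : Prop := ∀ (rangestring : String) (length : Int), Dom_rangestring_to_mask rangestring length → Pre_rangestring_to_mask rangestring length → Spec_rangestring_to_mask rangestring length (rangestring_to_mask rangestring length)

-- ===== LEMMAS AND PROOFS =====

theorem witness_ok : Dom_rangestring_to_mask pvWitness_rangestring_to_mask.1 pvWitness_rangestring_to_mask.2 ∧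
    Pre_rangestring_to_mask pvWitness_rangestring_to_mask.1 pvWitness_rangestring_to_mask.2 := by decide

-- splitOn on a list not containing the (single-char) separator returns the whole list.
theorem splitOn_go_no_sep (c : Char) (l cur : List Char) (out : List (List Char))
    (hmem : c ∉ l) (fuel : Nat) (hf : l.length < fuel) :
    PySem.Chars.splitOn.go [c] fuel l cur out = (cur.reverse :: out).reverse.dropLast ++ [cur.reverse ++ l] := by
  induction fuel generalizing l cur with
  | zero => omega
  | succ fuel ih =>
    cases l with
    | nil => simp [PySem.Chars.splitOn.go]
    | cons d rest =>
      simp only [List.mem_cons, not_or] at hmem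
      have hne : ([c].isPrefixOf (d :: rest)) = false := by
        simp [List.isPrefixOf, beq_eq_false_iff_ne]
        exact hmem.1
      have hmem' : c ∉ rest := hmem.2
      rw [PySem.Chars.splitOn.go]
      simp only [hne, Bool.false_eq_true, if_false]
      rw [ih rest (d :: cur) hmem' (by simpa using Nat.lt_of_succ_lt_succ hf)]
      simp

theorem splitOn_no_sep (c : Char) (l : List Char) (hmem : c ∉ l) :
    PySem.Chars.splitOn l [c] = [l] := by
  unfold PySem.Chars.splitOn
  rw [splitOn_go_no_sep c l [] [] hmem (l.length + 1) (by omega)]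
  simp

-- strip keeps only characters of the original segment.
theorem mem_strip_subset {c : Char} {l : List Char} (h : c ∈ PySem.Chars.strip l) : c ∈ l := by
  unfold PySem.Chars.strip PySem.Chars.rstrip PySem.Chars.lstrip at h
  have h1 := (List.dropWhile_sublist (l := (List.dropWhile PySem.Chars.isspace l).reverse)
      (p := PySem.Chars.isspace)).subset (List.mem_reverse.mp h)
  exact (List.dropWhile_sublist (p := PySem.Chars.isspace)).subset (List.mem_reverse.mp h1)

-- The mask determined by a list of end-inclusive intervals (B's final containment pass).
def covB (ivs : List (Int × Int)) (i : Int) : Bool :=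
  ivs.any (fun p => decide (p.1 ≤ i) && decide (i ≤ p.2))

def maskOf (length : Int) (ivs : List (Int × Int)) : List Bool :=
  (PySem.List.pyRange 0 length).map (covB ivs)

theorem maskOf_empty (length : Int) :
    List.replicate length.toNat false = maskOf length [] := by
  unfold maskOf
  have h : covB [] = (fun _ : Int => false) := by funext i; rfl
  rw [h, List.map_const', PySem.List.length_pyRange_one]
  norm_num

theorem maskOf_append (len s e : Int) (ivs : List (Int × Int))
    (h0 : 0 ≤ s) (hse : s ≤ e + 1) (hel : e + 1 ≤ len) :
    (maskOf len ivs).take s.toNat ++ List.replicate (e + 1 - s).toNat true ++ (maskOf len ivs).drop (e + 1).toNat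
      = maskOf len (ivs ++ [(s, e)]) := by
  have hsplit : PySem.List.pyRange 0 len
      = PySem.List.pyRange 0 s ++ PySem.List.pyRange s (e+1) ++ PySem.List.pyRange (e+1) len := by
    rw [PySem.List.pyRange_one_append 0 (e+1) len (by omega) hel,
        PySem.List.pyRange_one_append 0 s (e+1) h0 hse]
  unfold maskOf
  rw [hsplit]
  simp only [List.map_append]
  have l1 : ((PySem.List.pyRange 0 s).map (covB ivs)).length = s.toNat := by
    simp only [List.length_map, PySem.List.length_pyRange_one]; omega
  have l2 : ((PySem.List.pyRange 0 s).map (covB ivs)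
        ++ (PySem.List.pyRange s (e+1)).map (covB ivs)).length = (e+1).toNat := by
    simp only [List.length_append, List.length_map, PySem.List.length_pyRange_one]; omega
  have ht : List.take s.toNat
        ((PySem.List.pyRange 0 s).map (covB ivs) ++ (PySem.List.pyRange s (e+1)).map (covB ivs)
          ++ (PySem.List.pyRange (e+1) len).map (covB ivs))
      = (PySem.List.pyRange 0 s).map (covB ivs) := by
    rw [List.append_assoc]
    exact List.take_left' l1
  have hdr : List.drop (e+1).toNat
        ((PySem.List.pyRange 0 s).map (covB ivs) ++ (PySem.List.pyRange s (e+1)).map (covB ivs)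
          ++ (PySem.List.pyRange (e+1) len).map (covB ivs))
      = (PySem.List.pyRange (e+1) len).map (covB ivs) :=
    List.drop_left' l2
  have e1 : (PySem.List.pyRange 0 s).map (covB (ivs ++ [(s, e)]))
      = (PySem.List.pyRange 0 s).map (covB ivs) := by
    apply List.map_congr_left
    intro x hx
    rw [PySem.List.mem_pyRange_one] at hx
    unfold covB
    rw [List.any_append]
    simp only [List.any_cons, List.any_nil, Bool.or_false]
    have : decide (s ≤ x) = false := by simp; omega
    simp [this]
  have e2 : (PySem.List.pyRange s (e+1)).map (covB (ivs ++ [(s, e)]))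
      = List.replicate (e + 1 - s).toNat true := by
    have hmap : (PySem.List.pyRange s (e+1)).map (covB (ivs ++ [(s, e)]))
        = (PySem.List.pyRange s (e+1)).map (fun _ => true) := by
      apply List.map_congr_left
      intro x hx
      rw [PySem.List.mem_pyRange_one] at hx
      unfold covB
      rw [List.any_append]
      simp only [List.any_cons, List.any_nil, Bool.or_false]
      have h1 : decide (s ≤ x) = true := by simp; omega
      have h2 : decide (x ≤ e) = true := by simp; omega
      simp [h1, h2]
    rw [hmap, List.map_const', PySem.List.length_pyRange_one]
  have e3 : (PySem.List.pyRange (e+1) len).map (covB (ivs ++ [(s, e)]))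
      = (PySem.List.pyRange (e+1) len).map (covB ivs) := by
    apply List.map_congr_left
    intro x hx
    rw [PySem.List.mem_pyRange_one] at hx
    unfold covB
    rw [List.any_append]
    simp only [List.any_cons, List.any_nil, Bool.or_false]
    have : decide (x ≤ e) = false := by simp; omega
    simp [this]
  rw [ht, hdr, e1, e2, e3]

theorem maskOf_set (len i : Int) (ivs : List (Int × Int)) (h0 : 0 ≤ i) (hl : i + 1 ≤ len) :
    (maskOf len ivs).set i.toNat true = maskOf len (ivs ++ [(i, i)]) := by
  rw [← maskOf_append len i i ivs h0 (by omega) hl]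
  have hlen : (maskOf len ivs).length = len.toNat := by
    unfold maskOf; rw [List.length_map, PySem.List.length_pyRange_one]; omega
  have hi : i.toNat < (maskOf len ivs).length := by omega
  rw [List.set_eq_take_append_cons_drop, if_pos hi]
  have h1 : (i + 1 - i) = (1 : Int) := by ring
  have h2 : (i + 1).toNat = i.toNat + 1 := by omega
  rw [h1, h2]
  simp

-- One valid segment: B's parser yields the interval update whose mask is exactly A's mutated mask.
theorem stepAB (length : Int) (ivs : List (Int × Int)) (r : List Char) (h : pvSegOK length r = true) :
    ∃ ivs', (rtmParseB length r).map
        (fun o => match o with | none => ivs | some p => ivs ++ [p]) = some ivs' ∧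
      rtmStepA length (maskOf length ivs) r = some (maskOf length ivs') := by
  unfold pvSegOK at h
  unfold rtmStepA rtmParseB
  by_cases hd : PySem.Chars.isIn ['-'] r = true
  · rw [if_pos hd] at h
    rw [if_pos hd]
    cases hp : PySem.Chars.splitOn (PySem.Chars.strip r) ['-'] with
    | nil => rw [hp] at h; simp at h
    | cons a t =>
      cases t with
      | nil => rw [hp] at h; simp at h
      | cons b t2 =>
        cases t2 with
        | cons c t3 => rw [hp] at h; simp at h
        | nil =>
          rw [hp] at h
          replace h : (match PySem.Int.ofChars? a, PySem.Int.ofChars? b with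
              | some s, some e => decide (0 ≤ s ∧ s ≤ e ∧ e + 1 ≤ length)
              | _, _ => false) = true := h
          cases hsa : PySem.Int.ofChars? a with
          | none => rw [hsa] at h; simp at h
          | some s =>
            cases hsb : PySem.Int.ofChars? b with
            | none => rw [hsa, hsb] at h; simp at h
            | some e =>
              rw [hsa, hsb] at h
              replace h : decide (0 ≤ s ∧ s ≤ e ∧ e + 1 ≤ length) = true := h
              simp only [decide_eq_true_eq] at h
              obtain ⟨h0, hse, hel⟩ := h
              refine ⟨ivs ++ [(s, e)], ?_, ?_⟩
              · show ((match PySem.Int.ofChars? a, PySem.Int.ofChars? b with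
                    | some s, some e =>
                      if e < s then none
                      else if e + 1 > length then none
                      else some (some (s, e))
                    | _, _ => none).map
                    (fun o => match o with | none => ivs | some p => ivs ++ [p])) = _
                rw [hsa, hsb]
                show ((if e < s then none
                    else if e + 1 > length then (none : Option (Option (Int × Int)))
                    else some (some (s, e))).map
                    (fun o => match o with | none => ivs | some p => ivs ++ [p])) = _
                rw [if_neg (by omega : ¬ e < s), if_neg (by omega : ¬ e + 1 > length)]
                rfl
              · show (match PySem.Int.ofChars? a, PySem.Int.ofChars? b with
                    | some s, some e =>
                      if e < s then none
                      else if e + 1 > length then none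
                      else some (List.take s.toNat (maskOf length ivs)
                        ++ List.replicate (e + 1 - s).toNat true
                        ++ List.drop (e + 1).toNat (maskOf length ivs))
                    | _, _ => none) = _
                rw [hsa, hsb]
                show (if e < s then none
                    else if e + 1 > length then none
                    else some (List.take s.toNat (maskOf length ivs)
                      ++ List.replicate (e + 1 - s).toNat true
                      ++ List.drop (e + 1).toNat (maskOf length ivs))) = _
                rw [if_neg (by omega : ¬ e < s), if_neg (by omega : ¬ e + 1 > length),
                    maskOf_append length s e ivs h0 (by omega) hel]
  · rw [if_neg hd] at h
    rw [if_neg hd]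
    have hnmem : '-' ∉ PySem.Chars.strip r := by
      intro hc
      exact hd (by
        rw [PySem.Chars.isIn_iff_infix]
        exact (List.singleton_infix_iff '-' r).mpr (mem_strip_subset hc))
    rw [splitOn_no_sep '-' (PySem.Chars.strip r) hnmem]
    by_cases he : r = []
    · subst he
      exact ⟨ivs, rfl, by rw [if_neg (by simp : ¬ ([] : List Char) ≠ [])]⟩
    · rw [if_neg he] at h
      cases hsi : PySem.Int.ofChars? r with
      | none => rw [hsi] at h; simp at h
      | some i =>
        rw [hsi] at h
        replace h : decide (0 ≤ i ∧ i + 1 ≤ length) = true := h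
        simp only [decide_eq_true_eq] at h
        obtain ⟨h0, hl⟩ := h
        refine ⟨ivs ++ [(i, i)], ?_, ?_⟩
        · show (Option.map
              (fun o => match o with | none => ivs | some p => ivs ++ [p])
              (if r ≠ [] then
                (if i + 1 > length then none else some (some (i, i)))
              else some none)) = _
          rw [if_pos he, if_neg (by omega : ¬ i + 1 > length)]
          rfl
        · show (if r ≠ [] then
                (if i + 1 > length then none
                  else some ((maskOf length ivs).set i.toNat true))
              else some (maskOf length ivs)) = _
          rw [if_pos he, if_neg (by omega : ¬ i + 1 > length),
              maskOf_set length i ivs h0 hl]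

theorem foldAB (length : Int) (segs : List (List Char)) (ivs : List (Int × Int))
    (h : segs.all (pvSegOK length) = true) :
    ∃ ivs', segs.foldl (fun st r => st.bind (fun a =>
        (rtmParseB length r).map (fun o => match o with | none => a | some p => a ++ [p]))) (some ivs) = some ivs' ∧
      segs.foldl (fun st r => st.bind (fun m => rtmStepA length m r)) (some (maskOf length ivs)) = some (maskOf length ivs') := by
  induction segs generalizing ivs with
  | nil => exact ⟨ivs, rfl, rfl⟩
  | cons r rest ih =>
    simp only [List.all_cons, Bool.and_eq_true] at h
    obtain ⟨ivs1, hb, ha⟩ := stepAB length ivs r h.1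
    obtain ⟨ivs', hb', ha'⟩ := ih ivs1 h.2
    exact ⟨ivs', by simpa [hb] using hb', by simpa [ha] using ha'⟩

-- On the empty string B folds over the single empty segment and keeps no interval.
theorem alt_empty (length : Int) :
    rangestring_to_mask_alt "" length = List.replicate length.toNat false := by
  unfold rangestring_to_mask_alt
  rw [show ("" : String).toList = [] from rfl,
      splitOn_no_sep ',' [] (by simp)]
  have hp : rtmParseB length [] = some none := by
    unfold rtmParseB
    rw [show PySem.Chars.strip ([] : List Char) = [] from rfl,
        splitOn_no_sep '-' [] (by simp)]
    rw [if_neg (by simp : ¬ ([] : List Char) ≠ [])]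
  simp only [List.foldl_cons, List.foldl_nil, Option.bind_some, hp, Option.map_some]
  exact (maskOf_empty length).symm

-- ===== VERDICT (by name: the statement is the Claim_ definition above) =====
theorem rangestring_to_mask_spec : Claim_equal_rangestring_to_mask := by
  intro rangestring length _ hpre
  unfold Spec_rangestring_to_mask
  by_cases hs : rangestring = ""
  · subst hs
    rw [alt_empty]
    unfold rangestring_to_mask
    simp
  · have hall : (PySem.Chars.splitOn rangestring.toList [',']).all (pvSegOK length) = true := by
      rcases hpre with h | h
      · exact absurd h hs
      · exact h
    obtain ⟨ivs', hb, ha⟩ := foldAB length (PySem.Chars.splitOn rangestring.toList [','])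
      [] hall
    rw [← maskOf_empty length] at ha
    unfold rangestring_to_mask rangestring_to_mask_alt
    simp only [if_neg hs, ha, hb]
    rfl
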